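-- pv_equiv track=rewrite | github.com/cnumin999/algorithm_termproject_final | src/searcher.py | highlight_terms
-- ===== SOURCE A (Python) =====
-- def highlight_terms(snippet: str, terms: list):
--     """검색어 하이라이트"""
--     if not snippet:
--         return snippet
--     low = snippet.lower()
--     terms_low = sorted({t.lower() for t in terms}, key=lambda x: -len(x))
--
--     spans = []
--     for t in terms_low:
--         pos = 0
--         while True:
--             idx = low.find(t, pos)
--             if idx == -1:
--                 break
--             spans.append((idx, idx + len(t)))
--             pos = idx + 1
--
--     if not spans:
--         return snippet
--
--     # 겹치는 span 병합
--     spans.sort()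
--     merged = []
--     cur_s, cur_e = spans[0]
--     for s, e in spans[1:]:
--         if s <= cur_e:
--             cur_e = max(cur_e, e)
--         else:
--             merged.append((cur_s, cur_e))
--             cur_s, cur_e = s, e
--     merged.append((cur_s, cur_e))
--
--     # 하이라이트 적용
--     result = []
--     last = 0
--     for s, e in merged:
--         result.append(snippet[last:s])
--         result.append("<<")
--         result.append(snippet[s:e])
--         result.append(">>")
--         last = e
--     result.append(snippet[last:])
--     return "".join(result)
-- ===== SOURCE B (Python) =====
-- def highlight_terms(snippet: str, terms: list):
--     """검색어 하이라이트 (per-position bucket arrays + one scan instead of dedup/sort/merge)"""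
--     if not snippet:
--         return snippet
--     low = snippet.lower()
--     n = len(snippet)
--     # bucket per start position: is any match starting here, and the furthest end
--     has_start = [False] * (n + 1)
--     max_end = [0] * (n + 1)
--     for t in terms:
--         tl = t.lower()
--         pos = 0
--         while True:
--             idx = low.find(tl, pos)
--             if idx == -1:
--                 break
--             has_start[idx] = True
--             if idx + len(tl) > max_end[idx]:
--                 max_end[idx] = idx + len(tl)
--             pos = idx + 1
--     # single left-to-right scan merges touching/overlapping buckets
--     merged = []
--     cur = None
--     for s in range(n + 1):
--         if has_start[s]:
--             if cur is not None and s <= cur[1]: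
--                 cur = (cur[0], max(cur[1], max_end[s]))
--             else:
--                 if cur is not None:
--                     merged.append(cur)
--                 cur = (s, max_end[s])
--     if cur is not None:
--         merged.append(cur)
--     if not merged:
--         return snippet
--     result = []
--     last = 0
--     for s, e in merged:
--         result.append(snippet[last:s])
--         result.append("<<")
--         result.append(snippet[s:e])
--         result.append(">>")
--         last = e
--     result.append(snippet[last:])
--     return "".join(result)
-- ===== Notes on version B (the rewrite author's own statement) =====
-- stated objective: alternative
-- what changed: Drops the set-dedup and length-sort of the terms and the collect/sort/merge span pipeline; instead the match loop fills per-position bucket arrays (has_start, max_end) and one left-to-right scan over positions merges touching clusters.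
import Mathlib
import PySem

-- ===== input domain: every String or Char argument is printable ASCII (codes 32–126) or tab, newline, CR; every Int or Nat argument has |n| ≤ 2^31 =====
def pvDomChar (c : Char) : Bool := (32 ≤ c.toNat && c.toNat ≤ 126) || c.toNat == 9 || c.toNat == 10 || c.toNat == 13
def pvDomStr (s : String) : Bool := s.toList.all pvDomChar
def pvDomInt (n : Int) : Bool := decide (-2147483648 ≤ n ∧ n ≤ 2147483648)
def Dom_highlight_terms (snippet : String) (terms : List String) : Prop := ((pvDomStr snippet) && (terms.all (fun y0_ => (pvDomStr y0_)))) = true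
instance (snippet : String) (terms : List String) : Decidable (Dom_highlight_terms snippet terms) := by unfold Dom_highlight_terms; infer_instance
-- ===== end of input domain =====

-- B drops the term dedup/length-sort and the span collect/sort/merge, filling per-position
-- bucket arrays (has_start, max_end) and merging clusters in one scan (objective: alternative).

-- ===== PORT A =====

-- bounds of s.find(sub, pos) for pos ≥ 0, used by the ports' termination proofs
theorem pvFindFromBounds (s t : List Char) (pos : Nat)
    (h : PySem.Chars.findFrom s t (pos : Int) none ≠ -1) :
    pos ≤ (PySem.Chars.findFrom s t (pos : Int) none).toNat ∧
    (PySem.Chars.findFrom s t (pos : Int) none).toNat ≤ s.length := by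
  unfold PySem.Chars.findFrom at *
  simp only at h ⊢
  have hpos : ¬ ((pos : Int) < 0) := by simp
  rw [if_neg hpos] at h ⊢
  by_cases hle : (s.length : Int) < (pos : Int)
  · rw [if_pos hle] at h; simp at h
  · rw [if_neg hle] at h ⊢
    set r := PySem.Chars.find (List.drop (Int.toNat (pos:Int)) (List.take (Int.toNat (s.length:Int)) s)) t with hr
    by_cases h0 : r = -1
    · rw [if_pos h0] at h; simp at h
    · rw [if_neg h0] at h ⊢
      have h1 : -1 ≤ r := PySem.Chars.neg_one_le_find _ _
      have h2 : r ≤ ((List.drop (Int.toNat (pos:Int)) (List.take (Int.toNat (s.length:Int)) s)).length : Int) :=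
        PySem.Chars.find_le_length _ _
      simp [List.length_drop] at h2
      omega

-- the inner 'while True: idx = low.find(t, pos) …' loop of A, collecting spans (idx, idx+len(t))
def pvSpansFor (low t : List Char) (pos : Nat) : List (Int × Int) :=
  let idx := PySem.Chars.findFrom low t (pos : Int) none
  if h : idx = -1 then []
  else (idx, idx + (t.length : Int)) :: pvSpansFor low t (idx.toNat + 1)
termination_by low.length + 1 - pos
decreasing_by
  have := pvFindFromBounds low t pos h
  omega

def highlight_terms (snippet : String) (terms : List String) : String :=
  if PySem.Str.len snippet = 0 then snippet
  else
    let cs := snippet.toList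
    let low := PySem.Chars.lower cs
    let terms_low := PySem.List.sorted (PySem.Set.ofList (terms.map (fun t => PySem.Chars.lower t.toList)))
        (fun t => -(t.length : Int)) false
    let spans := terms_low.foldl (fun acc t => acc ++ pvSpansFor low t 0) []
    if spans = [] then snippet
    else
      match PySem.List.sorted2 spans (fun p => p.1) (fun p => p.2) false with
      | [] => snippet  -- unreachable: sorted2 of a nonempty list is nonempty (spans[0] in Python)
      | (s0, e0) :: rest =>
        let st := rest.foldl
          (fun (st : List (Int × Int) × Int × Int) p =>
            if p.1 ≤ st.2.2 then (st.1, st.2.1, max st.2.2 p.2)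
            else (st.1 ++ [(st.2.1, st.2.2)], p.1, p.2)) ([], s0, e0)
        let merged := st.1 ++ [st.2]
        let r := merged.foldl
          (fun (r : List (List Char) × Int) p =>
            (r.1 ++ [PySem.List.slice cs (some r.2) (some p.1), ['<','<'],
                     PySem.List.slice cs (some p.1) (some p.2), ['>','>']], p.2)) ([], 0)
        String.ofList (PySem.Chars.join [] (r.1 ++ [PySem.List.slice cs (some r.2) none]))

-- ===== PORT B =====

-- the inner 'while True: idx = low.find(tl, pos) …' loop of B, filling the two buckets
def pvBucketFor (low t : List Char) (pos : Nat) (hs : List Bool) (me : List Int) :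
    List Bool × List Int :=
  let idx := PySem.Chars.findFrom low t (pos : Int) none
  if h : idx = -1 then (hs, me)
  else
    pvBucketFor low t (idx.toNat + 1)
      (PySem.List.pySetD hs idx true)
      (if idx + (t.length : Int) > PySem.List.pyGetD me idx 0
       then PySem.List.pySetD me idx (idx + (t.length : Int)) else me)
termination_by low.length + 1 - pos
decreasing_by
  have := pvFindFromBounds low t pos h
  omega

def highlight_terms_alt (snippet : String) (terms : List String) : String :=
  if PySem.Str.len snippet = 0 then snippet
  else
    let cs := snippet.toList
    let low := PySem.Chars.lower cs
    let bk := terms.foldl (fun b t => pvBucketFor low (PySem.Chars.lower t.toList) 0 b.1 b.2)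
        (List.replicate (cs.length + 1) false, List.replicate (cs.length + 1) (0 : Int))
    let sc := (PySem.List.pyRange 0 ((cs.length : Int) + 1)).foldl
      (fun (st : List (Int × Int) × Option (Int × Int)) s =>
        if PySem.List.pyGetD bk.1 s false then
          match st.2 with
          | some c =>
            if s ≤ c.2 then (st.1, some (c.1, max c.2 (PySem.List.pyGetD bk.2 s 0)))
            else (st.1 ++ [c], some (s, PySem.List.pyGetD bk.2 s 0))
          | none => (st.1, some (s, PySem.List.pyGetD bk.2 s 0))
        else st) ([], none)
    let merged := match sc.2 with
      | some c => sc.1 ++ [c]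
      | none => sc.1
    if merged = [] then snippet
    else
      let r := merged.foldl
        (fun (r : List (List Char) × Int) p =>
          (r.1 ++ [PySem.List.slice cs (some r.2) (some p.1), ['<','<'],
                   PySem.List.slice cs (some p.1) (some p.2), ['>','>']], p.2)) ([], 0)
      String.ofList (PySem.Chars.join [] (r.1 ++ [PySem.List.slice cs (some r.2) none]))

-- ===== PRECONDITION & SPEC =====
def Spec_highlight_terms (snippet : String) (terms : List String) (out : String) : Prop :=
  out = highlight_terms_alt snippet terms
instance (snippet : String) (terms : List String) (out : String) : Decidable (Spec_highlight_terms snippet terms out) := by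
  unfold Spec_highlight_terms; infer_instance

-- ===== CLAIM (what is proved, stated in full; the proofs are below) =====
def Claim_equal_highlight_terms : Prop := ∀ (snippet : String) (terms : List String), Dom_highlight_terms snippet terms → Spec_highlight_terms snippet terms (highlight_terms snippet terms)

-- ===== LEMMAS AND PROOFS =====

-- occurrence of t in low at index j
def pvOcc (low t : List Char) (j : Nat) : Prop := t <+: low.drop j

-- position i (an Int) lies in some half-open span of L / in some closed span of L
def pvCovSp (L : List (Int × Int)) (i : Int) : Prop := ∃ p ∈ L, p.1 ≤ i ∧ i < p.2
def pvCovC (L : List (Int × Int)) (i : Int) : Prop := ∃ p ∈ L, p.1 ≤ i ∧ i ≤ p.2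

-- spans sorted lexicographically (Python tuple sort)
def pvLexLe (p q : Int × Int) : Prop := p.1 < q.1 ∨ (p.1 = q.1 ∧ p.2 ≤ q.2)

theorem pvInsertBy_pairwise {α : Type} (before : α → α → Bool)
    (h1 : ∀ a b, before a b = true → before b a = false)
    (h2 : ∀ a b c, before b a = false → before c b = false → before c a = false)
    (x : α) (ys : List α) (hys : ys.Pairwise (fun a b => before b a = false)) :
    (PySem.List.insertBy before x ys).Pairwise (fun a b => before b a = false) := by
  induction ys with
  | nil => simp [PySem.List.insertBy]
  | cons y ys ih =>
    rw [List.pairwise_cons] at hys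
    by_cases hxy : before x y = true
    · simp only [PySem.List.insertBy, hxy, if_true]
      refine List.Pairwise.cons ?_ (List.Pairwise.cons hys.1 hys.2)
      intro z hz
      rcases List.mem_cons.mp hz with rfl | hz
      · exact h1 _ _ hxy
      · exact h2 _ _ _ (h1 _ _ hxy) (hys.1 z hz)
    · simp only [PySem.List.insertBy, hxy, if_false]
      refine List.Pairwise.cons ?_ (ih hys.2)
      intro z hz
      rcases (PySem.List.mem_insertBy before x z ys).mp hz with rfl | hz
      · exact Bool.eq_false_iff.mpr hxy
      · exact hys.1 z hz

theorem pvSorted2_pairwise (xs : List (Int × Int)) :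
    (PySem.List.sorted2 xs (fun p => p.1) (fun p => p.2) false).Pairwise pvLexLe := by
  simp only [PySem.List.sorted2]
  set before := fun (a b : Int × Int) =>
    (decide (a.1 < b.1) || (!decide (b.1 < a.1) && decide (a.2 < b.2))) with hb
  have h1 : ∀ a b, before a b = true → before b a = false := by
    intro a b hab; simp [hb] at *; omega
  have h2 : ∀ a b c, before b a = false → before c b = false → before c a = false := by
    intro a b c hba hcb; simp [hb] at *; omega
  have key : ∀ (l : List (Int × Int)) (acc : List (Int × Int)),
      acc.Pairwise (fun a b => before b a = false) →
      (l.foldl (fun acc x => PySem.List.insertBy before x acc) acc).Pairwise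
        (fun a b => before b a = false) := by
    intro l
    induction l with
    | nil => intro acc h; exact h
    | cons x l ih => intro acc h; exact ih _ (pvInsertBy_pairwise before h1 h2 x acc h)
  refine (key xs [] (by simp)).imp ?_
  intro a b hab
  simp only [hb] at hab
  simp only [pvLexLe]
  simp at hab
  omega


-- an occurrence fits inside low
theorem pvOcc_le (low t : List Char) (j : Nat) (hj : j ≤ low.length) (h : pvOcc low t j) :
    j + t.length ≤ low.length := by
  have hlen := h.length_le
  simp [List.length_drop] at hlen
  omega


-- the find loop of A enumerates exactly the occurrence positions ≥ pos (any t, including "")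
theorem pvSpansFor_mem (low t : List Char) (pos : Nat) (p : Int × Int) :
    p ∈ pvSpansFor low t pos ↔
      ∃ j : Nat, pos ≤ j ∧ j ≤ low.length ∧ pvOcc low t j ∧
        p = ((j : Int), (j : Int) + (t.length : Int)) := by
  suffices H : ∀ (m pos : Nat), low.length + 1 - pos ≤ m → ∀ p : Int × Int,
      (p ∈ pvSpansFor low t pos ↔
        ∃ j : Nat, pos ≤ j ∧ j ≤ low.length ∧ pvOcc low t j ∧
          p = ((j : Int), (j : Int) + (t.length : Int))) by
    exact H (low.length + 1) pos (by omega) p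
  intro m
  induction m with
  | zero =>
    intro pos hm p
    have hno : PySem.Chars.findFrom low t (pos : Int) none = -1 := by
      by_contra hne
      have := pvFindFromBounds low t pos hne
      omega
    rw [pvSpansFor]
    simp only [hno, dite_eq_ite, if_pos trivial, List.not_mem_nil, false_iff]
    rintro ⟨j, hj, hjn, _, _⟩
    omega
  | succ m ih =>
    intro pos hm p
    rw [pvSpansFor]
    by_cases hidx : PySem.Chars.findFrom low t (pos : Int) none = -1
    · simp only [hidx, dite_eq_ite, if_pos trivial, List.not_mem_nil, false_iff]
      rintro ⟨j, hj, hjn, hocc, _⟩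
      by_cases hpos : pos ≤ low.length
      · have hninf : ¬ t <:+: low.drop pos :=
          (PySem.Chars.findFrom_natCast_eq_neg_one_iff low t pos hpos).mp hidx
        apply hninf
        have hocc' : t <+: (low.drop pos).drop (j - pos) := by
          rw [List.drop_drop]
          have hjj : pos + (j - pos) = j := by omega
          rw [hjj]
          exact hocc
        exact hocc'.isInfix.trans (List.drop_suffix _ _).isInfix
      · omega
    · have hb := pvFindFromBounds low t pos hidx
      have hposle : pos ≤ low.length := by omega
      obtain ⟨hle, hpre, hmin⟩ := PySem.Chars.findFrom_natCast_spec low t pos hposle hidx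
      set idx := PySem.Chars.findFrom low t (pos : Int) none with hidxdef
      have h0 : (0 : Int) ≤ idx := le_trans (by exact_mod_cast Int.natCast_nonneg pos) hle
      have hcast : ((idx.toNat : Nat) : Int) = idx := Int.toNat_of_nonneg h0
      simp only [hidx, dite_eq_ite, if_neg not_false, List.mem_cons]
      rw [ih (idx.toNat + 1) (by omega) p]
      constructor
      · rintro (rfl | ⟨j, hj, hjn, hocc, rfl⟩)
        · refine ⟨idx.toNat, hb.1, hb.2, hpre, ?_⟩
          rw [hcast]
        · exact ⟨j, by omega, hjn, hocc, rfl⟩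
      · rintro ⟨j, hj, hjn, hocc, rfl⟩
        rcases Nat.lt_trichotomy j idx.toNat with hlt | heq | hgt
        · exact absurd hocc (hmin j hj hlt)
        · subst heq
          left
          rw [hcast]
        · exact Or.inr ⟨j, by omega, hjn, hocc, rfl⟩

-- the merge loop of A over lex-sorted (possibly degenerate) spans: gap-separated, in-bounds,
-- and the same open and closed coverage
theorem pvMergeInv (n : Int) :
    ∀ (rest m : List (Int × Int)) (cs ce : Int),
    rest.Pairwise pvLexLe →
    (∀ p ∈ rest, 0 ≤ p.1 ∧ p.1 ≤ p.2 ∧ p.2 ≤ n) →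
    (∀ p ∈ rest, cs ≤ p.1) →
    m.Pairwise (fun p q => p.2 < q.1) →
    (∀ q ∈ m, q.2 < cs) →
    (∀ q ∈ m, 0 ≤ q.1 ∧ q.1 ≤ q.2 ∧ q.2 ≤ n) →
    0 ≤ cs → cs ≤ ce → ce ≤ n →
    ∀ fin : List (Int × Int),
    fin = (rest.foldl (fun (st : List (Int × Int) × Int × Int) p =>
        if p.1 ≤ st.2.2 then (st.1, st.2.1, max st.2.2 p.2)
        else (st.1 ++ [(st.2.1, st.2.2)], p.1, p.2)) (m, cs, ce)).1 ++
      [(rest.foldl (fun (st : List (Int × Int) × Int × Int) p =>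
        if p.1 ≤ st.2.2 then (st.1, st.2.1, max st.2.2 p.2)
        else (st.1 ++ [(st.2.1, st.2.2)], p.1, p.2)) (m, cs, ce)).2] →
    fin.Pairwise (fun p q => p.2 < q.1) ∧
    (∀ q ∈ fin, 0 ≤ q.1 ∧ q.1 ≤ q.2 ∧ q.2 ≤ n) ∧
    (∀ i : Int, pvCovSp fin i ↔ (pvCovSp m i ∨ (cs ≤ i ∧ i < ce) ∨ pvCovSp rest i)) ∧
    (∀ i : Int, pvCovC fin i ↔ (pvCovC m i ∨ (cs ≤ i ∧ i ≤ ce) ∨ pvCovC rest i)) := by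
  intro rest
  induction rest with
  | nil =>
    intro m cs ce _ _ _ hmpw hmlt hmb h0 hce hn fin hfin
    simp only [List.foldl_nil] at hfin
    subst hfin
    refine ⟨?_, ?_, ?_, ?_⟩
    · rw [List.pairwise_append]
      exact ⟨hmpw, List.pairwise_singleton _ _, fun q hq r hr => by
        simp only [List.mem_singleton] at hr; subst hr; exact hmlt q hq⟩
    · intro q hq
      rcases List.mem_append.mp hq with hq | hq
      · exact hmb q hq
      · simp only [List.mem_singleton] at hq; subst hq; exact ⟨h0, hce, hn⟩
    · intro i
      simp only [pvCovSp, List.mem_append, List.mem_singleton, List.not_mem_nil]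
      constructor
      · rintro ⟨p, hp | hp, hpi⟩
        · exact Or.inl ⟨p, hp, hpi⟩
        · subst hp; exact Or.inr (Or.inl hpi)
      · rintro (⟨p, hp, hpi⟩ | hpi | ⟨p, hfalse, _⟩)
        · exact ⟨p, Or.inl hp, hpi⟩
        · exact ⟨(cs, ce), Or.inr rfl, hpi⟩
        · exact absurd hfalse (by simp)
    · intro i
      simp only [pvCovC, List.mem_append, List.mem_singleton, List.not_mem_nil]
      constructor
      · rintro ⟨p, hp | hp, hpi⟩
        · exact Or.inl ⟨p, hp, hpi⟩
        · subst hp; exact Or.inr (Or.inl hpi)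
      · rintro (⟨p, hp, hpi⟩ | hpi | ⟨p, hfalse, _⟩)
        · exact ⟨p, Or.inl hp, hpi⟩
        · exact ⟨(cs, ce), Or.inr rfl, hpi⟩
        · exact absurd hfalse (by simp)
  | cons p rest ih =>
    intro m cs ce hpw hbnd hcsle hmpw hmlt hmb h0 hce hn fin hfin
    rw [List.pairwise_cons] at hpw
    have hpb := hbnd p (List.mem_cons_self)
    have hcsp := hcsle p (List.mem_cons_self)
    simp only [List.foldl_cons] at hfin
    by_cases hple : p.1 ≤ ce
    · rw [if_pos hple] at hfin
      obtain ⟨h1, h2, h3, h4⟩ := ih m cs (max ce p.2) hpw.2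
        (fun q hq => hbnd q (List.mem_cons_of_mem _ hq))
        (fun q hq => le_trans hcsp ((hpw.1 q hq).elim le_of_lt (fun h => le_of_eq h.1)))
        hmpw hmlt hmb h0 (le_max_of_le_left hce) (max_le hn hpb.2.2) fin hfin
      refine ⟨h1, h2, ?_, ?_⟩
      · intro i
        rw [h3 i]
        have hiff : (cs ≤ i ∧ i < max ce p.2) ↔ ((cs ≤ i ∧ i < ce) ∨ (p.1 ≤ i ∧ i < p.2)) := by
          omega
        simp only [pvCovSp, List.mem_cons]
        constructor
        · rintro (h | h | h)
          · exact Or.inl h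
          · rcases hiff.mp h with h | h
            · exact Or.inr (Or.inl h)
            · exact Or.inr (Or.inr ⟨p, Or.inl rfl, h⟩)
          · obtain ⟨q, hq, hqi⟩ := h
            exact Or.inr (Or.inr ⟨q, Or.inr hq, hqi⟩)
        · rintro (h | h | ⟨q, hq | hq, hqi⟩)
          · exact Or.inl h
          · exact Or.inr (Or.inl (hiff.mpr (Or.inl h)))
          · subst hq; exact Or.inr (Or.inl (hiff.mpr (Or.inr hqi)))
          · exact Or.inr (Or.inr ⟨q, hq, hqi⟩)
      · intro i
        rw [h4 i]
        have hiff : (cs ≤ i ∧ i ≤ max ce p.2) ↔ ((cs ≤ i ∧ i ≤ ce) ∨ (p.1 ≤ i ∧ i ≤ p.2)) := by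
          omega
        simp only [pvCovC, List.mem_cons]
        constructor
        · rintro (h | h | h)
          · exact Or.inl h
          · rcases hiff.mp h with h | h
            · exact Or.inr (Or.inl h)
            · exact Or.inr (Or.inr ⟨p, Or.inl rfl, h⟩)
          · obtain ⟨q, hq, hqi⟩ := h
            exact Or.inr (Or.inr ⟨q, Or.inr hq, hqi⟩)
        · rintro (h | h | ⟨q, hq | hq, hqi⟩)
          · exact Or.inl h
          · exact Or.inr (Or.inl (hiff.mpr (Or.inl h)))
          · subst hq; exact Or.inr (Or.inl (hiff.mpr (Or.inr hqi)))
          · exact Or.inr (Or.inr ⟨q, hq, hqi⟩)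
    · rw [if_neg hple] at hfin
      have hm'pw : (m ++ [(cs, ce)]).Pairwise (fun p q => p.2 < q.1) := by
        rw [List.pairwise_append]
        exact ⟨hmpw, List.pairwise_singleton _ _, fun q hq r hr => by
          simp only [List.mem_singleton] at hr; subst hr; exact hmlt q hq⟩
      obtain ⟨h1, h2, h3, h4⟩ := ih (m ++ [(cs, ce)]) p.1 p.2 hpw.2
        (fun q hq => hbnd q (List.mem_cons_of_mem _ hq))
        (fun q hq => (hpw.1 q hq).elim le_of_lt (fun h => le_of_eq h.1))
        hm'pw
        (fun q hq => by
          rcases List.mem_append.mp hq with hq | hq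
          · exact lt_trans (lt_of_lt_of_le (hmlt q hq) hce) (by omega)
          · simp only [List.mem_singleton] at hq; subst hq; omega)
        (fun q hq => by
          rcases List.mem_append.mp hq with hq | hq
          · exact hmb q hq
          · simp only [List.mem_singleton] at hq; subst hq; exact ⟨h0, hce, hn⟩)
        hpb.1 hpb.2.1 hpb.2.2 fin hfin
      refine ⟨h1, h2, ?_, ?_⟩
      · intro i
        rw [h3 i]
        simp only [pvCovSp, List.mem_append, List.mem_singleton, List.mem_cons]
        constructor
        · rintro (⟨q, hq | hq | hq, hqi⟩ | h | ⟨q, hq, hqi⟩)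
          · exact Or.inl ⟨q, hq, hqi⟩
          · exact Or.inr (Or.inl (by rw [hq] at hqi; exact hqi))
          · exact absurd hq (by simp)
          · exact Or.inr (Or.inr ⟨p, Or.inl rfl, h⟩)
          · exact Or.inr (Or.inr ⟨q, Or.inr hq, hqi⟩)
        · rintro (⟨q, hq, hqi⟩ | h | ⟨q, hq | hq, hqi⟩)
          · exact Or.inl ⟨q, Or.inl hq, hqi⟩
          · exact Or.inl ⟨(cs, ce), Or.inr (Or.inl rfl), h⟩
          · exact Or.inr (Or.inl (by rw [hq] at hqi; exact hqi))
          · exact Or.inr (Or.inr ⟨q, hq, hqi⟩)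
      · intro i
        rw [h4 i]
        simp only [pvCovC, List.mem_append, List.mem_singleton, List.mem_cons]
        constructor
        · rintro (⟨q, hq | hq | hq, hqi⟩ | h | ⟨q, hq, hqi⟩)
          · exact Or.inl ⟨q, hq, hqi⟩
          · exact Or.inr (Or.inl (by rw [hq] at hqi; exact hqi))
          · exact absurd hq (by simp)
          · exact Or.inr (Or.inr ⟨p, Or.inl rfl, h⟩)
          · exact Or.inr (Or.inr ⟨q, Or.inr hq, hqi⟩)
        · rintro (⟨q, hq, hqi⟩ | h | ⟨q, hq | hq, hqi⟩)
          · exact Or.inl ⟨q, Or.inl hq, hqi⟩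
          · exact Or.inl ⟨(cs, ce), Or.inr (Or.inl rfl), h⟩
          · exact Or.inr (Or.inl (by rw [hq] at hqi; exact hqi))
          · exact Or.inr (Or.inr ⟨q, hq, hqi⟩)

-- a gap-separated list of closed intervals is determined by its closed and open coverage
theorem pvUnique : ∀ (L1 L2 : List (Int × Int)),
    L1.Pairwise (fun p q => p.2 < q.1) → L2.Pairwise (fun p q => p.2 < q.1) →
    (∀ p ∈ L1, p.1 ≤ p.2) → (∀ p ∈ L2, p.1 ≤ p.2) →
    (∀ i : Int, pvCovC L1 i ↔ pvCovC L2 i) →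
    (∀ i : Int, pvCovSp L1 i ↔ pvCovSp L2 i) →
    L1 = L2 := by
  intro L1
  induction L1 with
  | nil =>
    intro L2 _ _ _ hb2 hC _
    cases L2 with
    | nil => rfl
    | cons q t2 =>
      exfalso
      have : pvCovC [] q.1 := (hC q.1).mpr ⟨q, List.mem_cons_self, le_rfl, hb2 q List.mem_cons_self⟩
      obtain ⟨p, hp, _⟩ := this
      exact absurd hp (by simp)
  | cons p t1 ih =>
    intro L2 hpw1 hpw2 hb1 hb2 hC hS
    cases L2 with
    | nil =>
      exfalso
      have : pvCovC [] p.1 := (hC p.1).mp ⟨p, List.mem_cons_self, le_rfl, hb1 p List.mem_cons_self⟩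
      obtain ⟨q, hq, _⟩ := this
      exact absurd hq (by simp)
    | cons q t2 =>
      rw [List.pairwise_cons] at hpw1 hpw2
      have hmin1 : ∀ i : Int, pvCovC (p :: t1) i → p.1 ≤ i := by
        rintro i ⟨p', hp', h1, h2⟩
        rcases List.mem_cons.mp hp' with rfl | hp'
        · exact h1
        · have := hpw1.1 p' hp'
          have := hb1 p List.mem_cons_self
          omega
      have hmin2 : ∀ i : Int, pvCovC (q :: t2) i → q.1 ≤ i := by
        rintro i ⟨q', hq', h1, h2⟩
        rcases List.mem_cons.mp hq' with rfl | hq'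
        · exact h1
        · have := hpw2.1 q' hq'
          have := hb2 q List.mem_cons_self
          omega
      have hs : p.1 = q.1 := by
        have h1 : q.1 ≤ p.1 := hmin2 p.1 ((hC p.1).mp ⟨p, List.mem_cons_self, le_rfl, hb1 p List.mem_cons_self⟩)
        have h2 : p.1 ≤ q.1 := hmin1 q.1 ((hC q.1).mpr ⟨q, List.mem_cons_self, le_rfl, hb2 q List.mem_cons_self⟩)
        omega
      have he : p.2 = q.2 := by
        rcases Int.lt_trichotomy p.2 q.2 with hlt | heq | hgt
        · exfalso
          have hop : pvCovSp (q :: t2) p.2 := ⟨q, List.mem_cons_self, by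
            have := hb1 p List.mem_cons_self
            omega⟩
          obtain ⟨p', hp', h1, h2⟩ := (hS p.2).mpr hop
          rcases List.mem_cons.mp hp' with rfl | hp'
          · omega
          · have := hpw1.1 p' hp'
            omega
        · exact heq
        · exfalso
          have hop : pvCovSp (p :: t1) q.2 := ⟨p, List.mem_cons_self, by
            have := hb2 q List.mem_cons_self
            omega⟩
          obtain ⟨q', hq', h1, h2⟩ := (hS q.2).mp hop
          rcases List.mem_cons.mp hq' with rfl | hq'
          · omega
          · have := hpw2.1 q' hq'
            omega
      have hpq : p = q := Prod.ext hs he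
      subst hpq
      congr 1
      have htC1 : ∀ i : Int, pvCovC t1 i ↔ (pvCovC (p :: t1) i ∧ p.2 < i) := by
        intro i
        constructor
        · rintro ⟨p', hp', h1, h2⟩
          have := hpw1.1 p' hp'
          exact ⟨⟨p', List.mem_cons_of_mem _ hp', h1, h2⟩, by omega⟩
        · rintro ⟨⟨p', hp', h1, h2⟩, hgt⟩
          rcases List.mem_cons.mp hp' with rfl | hp'
          · omega
          · exact ⟨p', hp', h1, h2⟩
      have htC2 : ∀ i : Int, pvCovC t2 i ↔ (pvCovC (p :: t2) i ∧ p.2 < i) := by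
        intro i
        constructor
        · rintro ⟨q', hq', h1, h2⟩
          have := hpw2.1 q' hq'
          exact ⟨⟨q', List.mem_cons_of_mem _ hq', h1, h2⟩, by omega⟩
        · rintro ⟨⟨q', hq', h1, h2⟩, hgt⟩
          rcases List.mem_cons.mp hq' with rfl | hq'
          · omega
          · exact ⟨q', hq', h1, h2⟩
      have htS1 : ∀ i : Int, pvCovSp t1 i ↔ (pvCovSp (p :: t1) i ∧ p.2 < i) := by
        intro i
        constructor
        · rintro ⟨p', hp', h1, h2⟩
          have := hpw1.1 p' hp'
          exact ⟨⟨p', List.mem_cons_of_mem _ hp', h1, h2⟩, by omega⟩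
        · rintro ⟨⟨p', hp', h1, h2⟩, hgt⟩
          rcases List.mem_cons.mp hp' with rfl | hp'
          · omega
          · exact ⟨p', hp', h1, h2⟩
      have htS2 : ∀ i : Int, pvCovSp t2 i ↔ (pvCovSp (p :: t2) i ∧ p.2 < i) := by
        intro i
        constructor
        · rintro ⟨q', hq', h1, h2⟩
          have := hpw2.1 q' hq'
          exact ⟨⟨q', List.mem_cons_of_mem _ hq', h1, h2⟩, by omega⟩
        · rintro ⟨⟨q', hq', h1, h2⟩, hgt⟩
          rcases List.mem_cons.mp hq' with rfl | hq'
          · omega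
          · exact ⟨q', hq', h1, h2⟩
      exact ih t2 hpw1.2 hpw2.2
        (fun p' hp' => hb1 p' (List.mem_cons_of_mem _ hp'))
        (fun q' hq' => hb2 q' (List.mem_cons_of_mem _ hq'))
        (fun i => (htC1 i).trans (Iff.trans (and_congr_left fun _ => hC i) (htC2 i).symm))
        (fun i => (htS1 i).trans (Iff.trans (and_congr_left fun _ => hS i) (htS2 i).symm))


-- the find loop of B marks has_start and raises max_end at every occurrence position ≥ pos
theorem pvBucketFor_spec (low t : List Char) : ∀ (pos : Nat) (hs : List Bool) (me : List Int),
    hs.length = low.length + 1 → me.length = low.length + 1 →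
    (pvBucketFor low t pos hs me).1.length = hs.length ∧
    (pvBucketFor low t pos hs me).2.length = me.length ∧
    (∀ j : Nat, (pvBucketFor low t pos hs me).1[j]? =
      hs[j]?.map (fun b => b || decide (pos ≤ j ∧ j ≤ low.length ∧ t <+: low.drop j))) ∧
    (∀ j : Nat, (pvBucketFor low t pos hs me).2[j]? =
      me[j]?.map (fun v => if pos ≤ j ∧ j ≤ low.length ∧ t <+: low.drop j
        then max v ((j : Int) + (t.length : Int)) else v)) := by
  suffices H : ∀ (m pos : Nat) (hs : List Bool) (me : List Int), low.length + 1 - pos ≤ m →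
      hs.length = low.length + 1 → me.length = low.length + 1 →
      (pvBucketFor low t pos hs me).1.length = hs.length ∧
      (pvBucketFor low t pos hs me).2.length = me.length ∧
      (∀ j : Nat, (pvBucketFor low t pos hs me).1[j]? =
        hs[j]?.map (fun b => b || decide (pos ≤ j ∧ j ≤ low.length ∧ t <+: low.drop j))) ∧
      (∀ j : Nat, (pvBucketFor low t pos hs me).2[j]? =
        me[j]?.map (fun v => if pos ≤ j ∧ j ≤ low.length ∧ t <+: low.drop j
          then max v ((j : Int) + (t.length : Int)) else v)) by
    intro pos hs me h1 h2; exact H (low.length + 1) pos hs me (by omega) h1 h2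
  intro m
  induction m with
  | zero =>
    intro pos hs me hm hhs hme
    have hno : PySem.Chars.findFrom low t (pos : Int) none = -1 := by
      by_contra hne
      have := pvFindFromBounds low t pos hne
      omega
    rw [pvBucketFor]
    simp only [hno, dite_eq_ite, if_pos trivial]
    refine ⟨trivial, trivial, ?_, ?_⟩
    · intro j
      have hd : ¬ (pos ≤ j ∧ j ≤ low.length ∧ t <+: low.drop j) := by omega
      simp [hd]
    · intro j
      have hd : ¬ (pos ≤ j ∧ j ≤ low.length ∧ t <+: low.drop j) := by omega
      simp [hd]
  | succ m ih =>
    intro pos hs me hm hhs hme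
    rw [pvBucketFor]
    by_cases hidx : PySem.Chars.findFrom low t (pos : Int) none = -1
    · simp only [hidx, dite_eq_ite, if_pos trivial]
      have hd : ∀ j : Nat, ¬ (pos ≤ j ∧ j ≤ low.length ∧ t <+: low.drop j) := by
        rintro j ⟨hj, hjn, hocc⟩
        have hpos : pos ≤ low.length := by omega
        have hninf : ¬ t <:+: low.drop pos :=
          (PySem.Chars.findFrom_natCast_eq_neg_one_iff low t pos hpos).mp hidx
        apply hninf
        have hocc' : t <+: (low.drop pos).drop (j - pos) := by
          rw [List.drop_drop]
          have hjj : pos + (j - pos) = j := by omega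
          rw [hjj]
          exact hocc
        exact hocc'.isInfix.trans (List.drop_suffix _ _).isInfix
      refine ⟨trivial, trivial, ?_, ?_⟩
      · intro j; simp [hd j]
      · intro j; simp [hd j]
    · have hb := pvFindFromBounds low t pos hidx
      have hposle : pos ≤ low.length := by omega
      obtain ⟨hle, hpre, hmin⟩ := PySem.Chars.findFrom_natCast_spec low t pos hposle hidx
      set idx := PySem.Chars.findFrom low t (pos : Int) none with hidxdef
      have h0 : (0 : Int) ≤ idx := le_trans (by exact_mod_cast Int.natCast_nonneg pos) hle
      have hcast : ((idx.toNat : Nat) : Int) = idx := Int.toNat_of_nonneg h0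
      simp only [hidx, dite_eq_ite, if_neg not_false]
      set jn := idx.toNat with hjn
      have hjlt : jn < hs.length := by omega
      have hjlt2 : jn < me.length := by omega
      -- the two single-position updates
      have hhs1 : PySem.List.pySetD hs idx true = hs.set jn true := by
        rw [← hcast, PySem.List.pySetD_natCast]
      have hcur : PySem.List.pyGetD me idx 0 = me[jn] := by
        rw [← hcast, PySem.List.pyGetD_natCast, List.getD_eq_getElem _ _ hjlt2]
      set me1 := (if idx + (t.length : Int) > PySem.List.pyGetD me idx 0
        then PySem.List.pySetD me idx (idx + (t.length : Int)) else me) with hme1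
      have hme1get : ∀ j : Nat, me1[j]? =
          me[j]?.map (fun v => if j = jn then max v ((jn : Int) + (t.length : Int)) else v) := by
        intro j
        rw [hme1, hcur]
        by_cases hc : idx + (t.length : Int) > me[jn]
        · rw [if_pos hc, ← hcast, PySem.List.pySetD_natCast, List.getElem?_set]
          by_cases hj : jn = j
          · subst hj
            rw [if_pos rfl, if_pos hjlt2, List.getElem?_eq_getElem hjlt2]
            simp only [Option.map_some]
            congr 1
            rw [if_pos trivial]
            exact (max_eq_right (by rw [hcast]; omega)).symm
          · rw [if_neg hj]
            cases hg : me[j]? with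
            | none => rfl
            | some v => simp [Ne.symm hj]
        · rw [if_neg hc]
          by_cases hj : j = jn
          · subst hj
            rw [List.getElem?_eq_getElem hjlt2]
            simp only [Option.map_some]
            congr 1
            rw [if_pos trivial]
            exact (max_eq_left (by rw [hcast]; omega)).symm
          · cases hg : me[j]? with
            | none => rfl
            | some v => simp [hj]
      have hme1len : me1.length = me.length := by
        rw [hme1]
        by_cases hc : idx + (t.length : Int) > PySem.List.pyGetD me idx 0
        · rw [if_pos hc, ← hcast, PySem.List.pySetD_natCast]; simp
        · rw [if_neg hc]
      obtain ⟨l1, l2, g1, g2⟩ := ih (jn + 1) (hs.set jn true) me1 (by omega)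
        (by simpa using hhs) (by rw [hme1len, hme])
      rw [hhs1]
      refine ⟨by rw [l1]; simp, by rw [l2, hme1len], ?_, ?_⟩
      · intro j
        rw [g1 j, List.getElem?_set]
        by_cases hj : jn = j
        · subst hj
          rw [if_pos rfl, if_pos hjlt, List.getElem?_eq_getElem hjlt]
          simp only [Option.map_some]
          congr 1
          have hocc : (pos ≤ jn ∧ jn ≤ low.length ∧ t <+: low.drop jn) := ⟨hb.1, hb.2, hpre⟩
          simp [hocc]
        · rw [if_neg hj]
          cases hg : hs[j]? with
          | none => rfl
          | some b =>
            simp only [Option.map_some]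
            congr 1
            have hiff : (jn + 1 ≤ j ∧ j ≤ low.length ∧ t <+: low.drop j) ↔
                (pos ≤ j ∧ j ≤ low.length ∧ t <+: low.drop j) := by
              constructor
              · rintro ⟨h1, h2, h3⟩; exact ⟨by omega, h2, h3⟩
              · rintro ⟨h1, h2, h3⟩
                refine ⟨?_, h2, h3⟩
                rcases Nat.lt_trichotomy j jn with hlt | heq | hgt
                · exact absurd h3 (hmin j h1 hlt)
                · exact absurd heq (fun h => hj (h ▸ rfl))
                · omega
            rw [decide_eq_decide.mpr hiff]
      · intro j
        rw [g2 j, hme1get j, Option.map_map]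
        cases hg : me[j]? with
        | none => rfl
        | some v =>
          simp only [Option.map_some, Function.comp]
          congr 1
          by_cases hocc : pos ≤ j ∧ j ≤ low.length ∧ t <+: low.drop j
          · rw [if_pos hocc]
            rcases Nat.lt_trichotomy j jn with hlt | heq | hgt
            · exact absurd hocc.2.2 (hmin j hocc.1 hlt)
            · have hd : ¬ (jn + 1 ≤ j ∧ j ≤ low.length ∧ t <+: low.drop j) := by omega
              rw [if_neg hd, if_pos heq, heq]
            · rw [if_neg (by omega : ¬ j = jn)]
              rw [if_pos ⟨by omega, hocc.2⟩]
          · rw [if_neg hocc]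
            have hj : ¬ j = jn := by
              intro h; subst h
              exact hocc ⟨hb.1, hb.2, hpre⟩
            rw [if_neg hj]
            have hd : ¬ (jn + 1 ≤ j ∧ j ≤ low.length ∧ t <+: low.drop j) := by
              rintro ⟨h1, h2, h3⟩
              exact hocc ⟨by omega, h2, h3⟩
            rw [if_neg hd]


-- the whole bucket-filling loop of B
theorem pvBucketAll (low : List Char) : ∀ (ts : List String) (hs : List Bool) (me : List Int),
    hs.length = low.length + 1 → me.length = low.length + 1 →
    ((ts.foldl (fun b t => pvBucketFor low (PySem.Chars.lower t.toList) 0 b.1 b.2) (hs, me)).1.length = hs.length) ∧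
    ((ts.foldl (fun b t => pvBucketFor low (PySem.Chars.lower t.toList) 0 b.1 b.2) (hs, me)).2.length = me.length) ∧
    (∀ j : Nat, (ts.foldl (fun b t => pvBucketFor low (PySem.Chars.lower t.toList) 0 b.1 b.2) (hs, me)).1[j]? =
      hs[j]?.map (fun b => b || decide (j ≤ low.length ∧
        ∃ t ∈ ts, (PySem.Chars.lower t.toList) <+: low.drop j))) ∧
    (∀ j : Nat, ∀ v0 : Int, me[j]? = some v0 →
      ∃ v : Int, (ts.foldl (fun b t => pvBucketFor low (PySem.Chars.lower t.toList) 0 b.1 b.2) (hs, me)).2[j]? = some v ∧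
        v0 ≤ v ∧
        (∀ t ∈ ts, (j ≤ low.length ∧ (PySem.Chars.lower t.toList) <+: low.drop j) →
          (j : Int) + ((PySem.Chars.lower t.toList).length : Int) ≤ v) ∧
        (v = v0 ∨ ∃ t ∈ ts, (j ≤ low.length ∧ (PySem.Chars.lower t.toList) <+: low.drop j) ∧
          v = (j : Int) + ((PySem.Chars.lower t.toList).length : Int))) := by
  intro ts
  induction ts with
  | nil =>
    intro hs me hhs hme
    refine ⟨rfl, rfl, ?_, ?_⟩
    · intro j
      simp
    · intro j v0 h0
      exact ⟨v0, h0, le_rfl, by simp, Or.inl rfl⟩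
  | cons t ts ih =>
    intro hs me hhs hme
    obtain ⟨l1, l2, g1, g2⟩ := pvBucketFor_spec low (PySem.Chars.lower t.toList) 0 hs me hhs hme
    simp only [List.foldl_cons]
    obtain ⟨L1, L2, G1, G2⟩ := ih (pvBucketFor low (PySem.Chars.lower t.toList) 0 hs me).1
      (pvBucketFor low (PySem.Chars.lower t.toList) 0 hs me).2 (by rw [l1, hhs]) (by rw [l2, hme])
    refine ⟨by rw [L1, l1], by rw [L2, l2], ?_, ?_⟩
    · intro j
      rw [G1 j, g1 j, Option.map_map]
      cases hg : hs[j]? with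
      | none => rfl
      | some b =>
        simp only [Option.map_some, Function.comp]
        congr 1
        rw [Bool.or_assoc]
        congr 1
        rw [← Bool.decide_or, decide_eq_decide]
        constructor
        · rintro (⟨_, hjn, hocc⟩ | ⟨hjn, u, hu, hocc⟩)
          · exact ⟨hjn, t, List.mem_cons_self, hocc⟩
          · exact ⟨hjn, u, List.mem_cons_of_mem _ hu, hocc⟩
        · rintro ⟨hjn, u, hu, hocc⟩
          rcases List.mem_cons.mp hu with rfl | hu
          · exact Or.inl ⟨Nat.zero_le _, hjn, hocc⟩
          · exact Or.inr ⟨hjn, u, hu, hocc⟩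
    · intro j v0 h0
      have h1 : (pvBucketFor low (PySem.Chars.lower t.toList) 0 hs me).2[j]? =
          some (if 0 ≤ j ∧ j ≤ low.length ∧ (PySem.Chars.lower t.toList) <+: low.drop j
            then max v0 ((j : Int) + ((PySem.Chars.lower t.toList).length : Int)) else v0) := by
        rw [g2 j, h0]
        rfl
      obtain ⟨v, hv, hle, hbnd, hcases⟩ := G2 j _ h1
      refine ⟨v, hv, ?_, ?_, ?_⟩
      · refine le_trans ?_ hle
        by_cases hc : 0 ≤ j ∧ j ≤ low.length ∧ (PySem.Chars.lower t.toList) <+: low.drop j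
        · rw [if_pos hc]; exact le_max_left _ _
        · rw [if_neg hc]
      · intro u hu hocc
        rcases List.mem_cons.mp hu with rfl | hu
        · refine le_trans ?_ hle
          rw [if_pos ⟨Nat.zero_le _, hocc.1, hocc.2⟩]
          exact le_max_right _ _
        · exact hbnd u hu hocc
      · rcases hcases with hv0 | ⟨u, hu, hocc, hval⟩
        · by_cases hc : 0 ≤ j ∧ j ≤ low.length ∧ (PySem.Chars.lower t.toList) <+: low.drop j
          · rw [if_pos hc] at hv0
            rcases max_choice v0 ((j : Int) + ((PySem.Chars.lower t.toList).length : Int)) with hm | hm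
            · exact Or.inl (by rw [hv0, hm])
            · exact Or.inr ⟨t, List.mem_cons_self, ⟨hc.2.1, hc.2.2⟩, by rw [hv0, hm]⟩
          · rw [if_neg hc] at hv0
            exact Or.inl hv0
        · exact Or.inr ⟨u, List.mem_cons_of_mem _ hu, hocc, hval⟩


-- the scan loop of B, once a first cluster exists, is A's merge fold over the bucket pairs
theorem pvScanFold (me2 : List Int) : ∀ (ss : List Int) (acc : List (Int × Int)) (c : Int × Int),
    ss.foldl (fun (st : List (Int × Int) × Option (Int × Int)) s =>
      match st.2 with
      | some c => if s ≤ c.2 then (st.1, some (c.1, max c.2 (PySem.List.pyGetD me2 s 0)))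
                  else (st.1 ++ [c], some (s, PySem.List.pyGetD me2 s 0))
      | none => (st.1, some (s, PySem.List.pyGetD me2 s 0))) (acc, some c)
    = (((ss.map (fun s => (s, PySem.List.pyGetD me2 s 0))).foldl
        (fun (st : List (Int × Int) × Int × Int) p =>
          if p.1 ≤ st.2.2 then (st.1, st.2.1, max st.2.2 p.2)
          else (st.1 ++ [(st.2.1, st.2.2)], p.1, p.2)) (acc, c.1, c.2)).1,
       some ((ss.map (fun s => (s, PySem.List.pyGetD me2 s 0))).foldl
        (fun (st : List (Int × Int) × Int × Int) p =>
          if p.1 ≤ st.2.2 then (st.1, st.2.1, max st.2.2 p.2)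
          else (st.1 ++ [(st.2.1, st.2.2)], p.1, p.2)) (acc, c.1, c.2)).2) := by
  intro ss
  induction ss with
  | nil => intro acc c; rfl
  | cons s ss ih =>
    intro acc c
    simp only [List.foldl_cons, List.map_cons]
    by_cases h : s ≤ c.2
    · rw [if_pos h, if_pos h]
      exact ih acc (c.1, max c.2 (PySem.List.pyGetD me2 s 0))
    · rw [if_neg h, if_neg h]
      exact ih (acc ++ [c]) (s, PySem.List.pyGetD me2 s 0)

theorem highlight_terms_spec : Claim_equal_highlight_terms := by
  intro snippet terms _hdom
  unfold Spec_highlight_terms highlight_terms highlight_terms_alt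
  by_cases h0 : PySem.Str.len snippet = 0
  · rw [if_pos h0, if_pos h0]
  · rw [if_neg h0, if_neg h0]
    dsimp only
    rw [PySem.List.foldl_append_eq_flatMap]
    simp only [List.nil_append]
    set cs := snippet.toList with hcsd
    set low := PySem.Chars.lower cs with hlowd
    set tls := terms.map (fun t => PySem.Chars.lower t.toList) with htlsd
    set tlow := PySem.List.sorted (PySem.Set.ofList tls) (fun t => -((t.length : Int))) false with htlowd
    set spans := tlow.flatMap (fun t => pvSpansFor low t 0) with hspansd
    have hlow_len : low.length = cs.length := by rw [hlowd]; simp [PySem.Chars.lower]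
    have htlow_iff : ∀ tl, tl ∈ tlow ↔ tl ∈ tls := by
      intro tl
      rw [htlowd, PySem.List.mem_sorted, PySem.Set.mem_ofList]
    have hspan_mem : ∀ p, p ∈ spans ↔
        ∃ tl ∈ tls, ∃ j : Nat, j ≤ low.length ∧ pvOcc low tl j ∧
          p = ((j : Int), (j : Int) + (tl.length : Int)) := by
      intro p
      rw [hspansd, List.mem_flatMap]
      constructor
      · rintro ⟨tl, htl, hp⟩
        rw [pvSpansFor_mem low tl 0 p] at hp
        obtain ⟨j, _, hjn, hocc, rfl⟩ := hp
        exact ⟨tl, (htlow_iff tl).mp htl, j, hjn, hocc, rfl⟩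
      · rintro ⟨tl, htl, j, hjn, hocc, rfl⟩
        exact ⟨tl, (htlow_iff tl).mpr htl,
          (pvSpansFor_mem low tl 0 _).mpr ⟨j, Nat.zero_le j, hjn, hocc, rfl⟩⟩
    have hbounds : ∀ p ∈ spans, 0 ≤ p.1 ∧ p.1 ≤ p.2 ∧ p.2 ≤ (cs.length : Int) := by
      intro p hp
      obtain ⟨tl, htl, j, hjn, hocc, rfl⟩ := (hspan_mem p).mp hp
      have h1 := pvOcc_le low tl j hjn hocc
      rw [← hlow_len]
      refine ⟨?_, ?_, ?_⟩
      · show (0 : Int) ≤ ((j : Nat) : Int)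
        exact_mod_cast Nat.zero_le j
      · show ((j : Nat) : Int) ≤ ((j : Nat) : Int) + ((tl.length : Nat) : Int)
        exact_mod_cast (by omega : j ≤ j + tl.length)
      · show ((j : Nat) : Int) + ((tl.length : Nat) : Int) ≤ ((low.length : Nat) : Int)
        exact_mod_cast h1
    -- B's buckets
    obtain ⟨bl1, bl2, bg1, bg2⟩ := pvBucketAll low terms
      (List.replicate (cs.length + 1) false) (List.replicate (cs.length + 1) (0 : Int))
      (by simp [hlow_len]) (by simp [hlow_len])
    set bk := terms.foldl (fun b t => pvBucketFor low (PySem.Chars.lower t.toList) 0 b.1 b.2)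
      (List.replicate (cs.length + 1) false, List.replicate (cs.length + 1) (0 : Int)) with hbkd
    have hhsget : ∀ k : Nat, k ≤ cs.length →
        PySem.List.pyGetD bk.1 (k : Int) false =
          decide (k ≤ low.length ∧ ∃ t ∈ terms, (PySem.Chars.lower t.toList) <+: low.drop k) := by
      intro k hk
      rw [PySem.List.pyGetD_natCast, List.getD_eq_getElem?_getD, bg1 k,
        List.getElem?_replicate, if_pos (by omega : k < cs.length + 1)]
      simp
    have hmeget : ∀ k : Nat, k ≤ cs.length →
        ∃ v : Int, PySem.List.pyGetD bk.2 (k : Int) 0 = v ∧ 0 ≤ v ∧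
          (∀ t ∈ terms, (k ≤ low.length ∧ (PySem.Chars.lower t.toList) <+: low.drop k) →
            (k : Int) + ((PySem.Chars.lower t.toList).length : Int) ≤ v) ∧
          (v = 0 ∨ ∃ t ∈ terms, (k ≤ low.length ∧ (PySem.Chars.lower t.toList) <+: low.drop k) ∧
            v = (k : Int) + ((PySem.Chars.lower t.toList).length : Int)) := by
      intro k hk
      obtain ⟨v, hv, hle, hbnd, hcases⟩ := bg2 k 0
        (by rw [List.getElem?_replicate, if_pos (by omega : k < cs.length + 1)])
      refine ⟨v, ?_, hle, hbnd, hcases⟩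
      rw [PySem.List.pyGetD_natCast, List.getD_eq_getElem?_getD, hv]
      rfl
    -- the scan range
    have hrange : PySem.List.pyRange 0 ((cs.length : Int) + 1) =
        (List.range (cs.length + 1)).map (fun (k : Nat) => (k : Int)) := by
      have h : ((cs.length : Int) + 1) = ((cs.length + 1 : Nat) : Int) := by push_cast; ring
      rw [h, PySem.List.pyRange_zero_natCast]
    rw [hrange]
    rw [PySem.List.foldl_if_eq_foldl_filter
      (p := fun s => PySem.List.pyGetD bk.1 s false)
      (f := fun (st : List (Int × Int) × Option (Int × Int)) s =>
        match st.2 with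
        | some c =>
          if s ≤ c.2 then (st.1, some (c.1, max c.2 (PySem.List.pyGetD bk.2 s 0)))
          else (st.1 ++ [c], some (s, PySem.List.pyGetD bk.2 s 0))
        | none => (st.1, some (s, PySem.List.pyGetD bk.2 s 0)))]
    set filt := (((List.range (cs.length + 1)).map (fun (k : Nat) => (k : Int))).filter
      (fun s => PySem.List.pyGetD bk.1 s false)) with hfiltd
    have hfilt_shape : ∀ x ∈ filt, ∃ k : Nat, x = (k : Int) ∧ k ≤ cs.length ∧
        PySem.List.pyGetD bk.1 (k : Int) false = true := by
      intro x hx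
      rw [hfiltd, List.mem_filter] at hx
      obtain ⟨hx1, hx2⟩ := hx
      obtain ⟨k, hk, rfl⟩ := List.mem_map.mp hx1
      exact ⟨k, rfl, by have := List.mem_range.mp hk; omega, hx2⟩
    have hfilt_memnat : ∀ k : Nat, k ≤ cs.length →
        PySem.List.pyGetD bk.1 (k : Int) false = true → (k : Int) ∈ filt := by
      intro k hk htrue
      rw [hfiltd, List.mem_filter]
      exact ⟨List.mem_map.mpr ⟨k, List.mem_range.mpr (by omega), rfl⟩, htrue⟩
    have hfilt_pw : filt.Pairwise (· < ·) := by
      rw [hfiltd]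
      refine List.Pairwise.sublist List.filter_sublist ?_
      refine List.Pairwise.map _ ?_ List.pairwise_lt_range
      intro a b hab
      exact_mod_cast hab
    -- the occurrence facts carried by filt and the buckets
    have hfilt_occ : ∀ x ∈ filt, ∃ k : Nat, x = (k : Int) ∧ k ≤ cs.length ∧
        ∃ t ∈ terms, (PySem.Chars.lower t.toList) <+: low.drop k := by
      intro x hx
      obtain ⟨k, rfl, hk, htrue⟩ := hfilt_shape x hx
      rw [hhsget k hk] at htrue
      rw [decide_eq_true_eq] at htrue
      exact ⟨k, rfl, hk, htrue.2⟩
    -- generic decompositions of coverage over a cons / over membership-equal lists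
    have hdecS : ∀ (a b : Int) (L : List (Int × Int)) (i : Int),
        (pvCovSp [] i ∨ (a ≤ i ∧ i < b) ∨ pvCovSp L i) ↔ pvCovSp ((a, b) :: L) i := by
      intro a b L i
      constructor
      · rintro (⟨p, hfalse, _⟩ | hh | ⟨p, hp, hpi⟩)
        · exact absurd hfalse (by simp)
        · exact ⟨(a, b), List.mem_cons_self, hh⟩
        · exact ⟨p, List.mem_cons_of_mem _ hp, hpi⟩
      · rintro ⟨p, hp, hpi⟩
        rcases List.mem_cons.mp hp with rfl | hp
        · exact Or.inr (Or.inl hpi)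
        · exact Or.inr (Or.inr ⟨p, hp, hpi⟩)
    have hdecC : ∀ (a b : Int) (L : List (Int × Int)) (i : Int),
        (pvCovC [] i ∨ (a ≤ i ∧ i ≤ b) ∨ pvCovC L i) ↔ pvCovC ((a, b) :: L) i := by
      intro a b L i
      constructor
      · rintro (⟨p, hfalse, _⟩ | hh | ⟨p, hp, hpi⟩)
        · exact absurd hfalse (by simp)
        · exact ⟨(a, b), List.mem_cons_self, hh⟩
        · exact ⟨p, List.mem_cons_of_mem _ hp, hpi⟩
      · rintro ⟨p, hp, hpi⟩
        rcases List.mem_cons.mp hp with rfl | hp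
        · exact Or.inr (Or.inl hpi)
        · exact Or.inr (Or.inr ⟨p, hp, hpi⟩)
    have hmemS : ∀ (L1 L2 : List (Int × Int)), (∀ p, p ∈ L1 ↔ p ∈ L2) →
        ∀ i : Int, pvCovSp L1 i ↔ pvCovSp L2 i := by
      intro L1 L2 hm i
      constructor
      · rintro ⟨p, hp, hpi⟩; exact ⟨p, (hm p).mp hp, hpi⟩
      · rintro ⟨p, hp, hpi⟩; exact ⟨p, (hm p).mpr hp, hpi⟩
    have hmemC : ∀ (L1 L2 : List (Int × Int)), (∀ p, p ∈ L1 ↔ p ∈ L2) →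
        ∀ i : Int, pvCovC L1 i ↔ pvCovC L2 i := by
      intro L1 L2 hm i
      constructor
      · rintro ⟨p, hp, hpi⟩; exact ⟨p, (hm p).mp hp, hpi⟩
      · rintro ⟨p, hp, hpi⟩; exact ⟨p, (hm p).mpr hp, hpi⟩
    by_cases hsp : spans = []
    · rw [if_pos hsp]
      have hfilt_nil : filt = [] := by
        rw [List.eq_nil_iff_forall_not_mem]
        intro x hx
        obtain ⟨k, rfl, hk, t, ht, hocc⟩ := hfilt_occ x hx
        have hmem : (((k : Nat) : Int), ((k : Nat) : Int) +
            (((PySem.Chars.lower t.toList).length : Nat) : Int)) ∈ spans :=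
          (hspan_mem _).mpr ⟨PySem.Chars.lower t.toList, List.mem_map.mpr ⟨t, ht, rfl⟩, k,
            (by rw [hlow_len]; exact hk), hocc, rfl⟩
        rw [hsp] at hmem
        exact absurd hmem (by simp)
      rw [hfilt_nil]
      simp only [List.foldl_nil]
      rfl
    · rw [if_neg hsp]
      -- A side: sorted spans and their merge
      have hperm := PySem.List.sorted2_perm spans (fun p => p.1) (fun p => p.2) false
      set sss := PySem.List.sorted2 spans (fun p => p.1) (fun p => p.2) false with hsssd
      have hssne : sss ≠ [] := by
        intro h
        rw [h] at hperm
        exact hsp (List.perm_nil.mp hperm.symm)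
      obtain ⟨p0, rest, hss⟩ := List.exists_cons_of_ne_nil hssne
      obtain ⟨s0, e0⟩ := p0
      have hmem_ss : ∀ p : Int × Int, p ∈ sss ↔ p ∈ spans := fun p => hperm.mem_iff
      have hpwss : sss.Pairwise pvLexLe := by rw [hsssd]; exact pvSorted2_pairwise spans
      rw [hss, List.pairwise_cons] at hpwss
      have hb0 := hbounds (s0, e0) ((hmem_ss _).mp (hss ▸ List.mem_cons_self))
      obtain ⟨hfpwA, hfbA, hfSA, hfCA⟩ := pvMergeInv (cs.length : Int) rest [] s0 e0 hpwss.2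
        (fun p hp => hbounds p ((hmem_ss p).mp (hss ▸ List.mem_cons_of_mem _ hp)))
        (fun p hp => (hpwss.1 p hp).elim le_of_lt (fun h => le_of_eq h.1))
        List.Pairwise.nil (by simp) (by simp) hb0.1 hb0.2.1 hb0.2.2 _ rfl
      rw [hss]
      dsimp only
      set finA := (rest.foldl (fun (st : List (Int × Int) × Int × Int) p =>
          if p.1 ≤ st.2.2 then (st.1, st.2.1, max st.2.2 p.2)
          else (st.1 ++ [(st.2.1, st.2.2)], p.1, p.2)) ([], s0, e0)).1 ++
        [(rest.foldl (fun (st : List (Int × Int) × Int × Int) p =>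
          if p.1 ≤ st.2.2 then (st.1, st.2.1, max st.2.2 p.2)
          else (st.1 ++ [(st.2.1, st.2.2)], p.1, p.2)) ([], s0, e0)).2] with hfinAd
      -- B side: nonempty filtered position list, converted to A's merge fold
      have hfiltne : filt ≠ [] := by
        intro h
        obtain ⟨p, hp⟩ := List.exists_mem_of_ne_nil spans hsp
        obtain ⟨tl, htl, j, hjn, hocc, rfl⟩ := (hspan_mem p).mp hp
        obtain ⟨t, ht, rfl⟩ := List.mem_map.mp htl
        have hj' : j ≤ cs.length := by rw [← hlow_len]; exact hjn
        have hmemf : ((j : Nat) : Int) ∈ filt := hfilt_memnat j hj' (by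
          rw [hhsget j hj', decide_eq_true_eq]
          exact ⟨hjn, t, ht, hocc⟩)
        rw [h] at hmemf
        exact absurd hmemf (by simp)
      obtain ⟨q0, qs, hfq⟩ := List.exists_cons_of_ne_nil hfiltne
      have hq0f : q0 ∈ filt := by rw [hfq]; exact List.mem_cons_self
      have hqsf : ∀ x ∈ qs, x ∈ filt := by
        intro x hx; rw [hfq]; exact List.mem_cons_of_mem _ hx
      rw [hfq]
      simp only [List.foldl_cons]
      rw [pvScanFold bk.2 qs [] (q0, PySem.List.pyGetD bk.2 q0 0)]
      dsimp only
      rw [if_neg (by simp : ¬ ((qs.map (fun s => (s, PySem.List.pyGetD bk.2 s 0))).foldl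
        (fun (st : List (Int × Int) × Int × Int) p =>
          if p.1 ≤ st.2.2 then (st.1, st.2.1, max st.2.2 p.2)
          else (st.1 ++ [(st.2.1, st.2.2)], p.1, p.2)) ([], q0, PySem.List.pyGetD bk.2 q0 0)).1 ++
        [((qs.map (fun s => (s, PySem.List.pyGetD bk.2 s 0))).foldl
        (fun (st : List (Int × Int) × Int × Int) p =>
          if p.1 ≤ st.2.2 then (st.1, st.2.1, max st.2.2 p.2)
          else (st.1 ++ [(st.2.1, st.2.2)], p.1, p.2)) ([], q0, PySem.List.pyGetD bk.2 q0 0)).2] = [])]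
      set finB := ((qs.map (fun s => (s, PySem.List.pyGetD bk.2 s 0))).foldl
        (fun (st : List (Int × Int) × Int × Int) p =>
          if p.1 ≤ st.2.2 then (st.1, st.2.1, max st.2.2 p.2)
          else (st.1 ++ [(st.2.1, st.2.2)], p.1, p.2)) ([], q0, PySem.List.pyGetD bk.2 q0 0)).1 ++
        [((qs.map (fun s => (s, PySem.List.pyGetD bk.2 s 0))).foldl
        (fun (st : List (Int × Int) × Int × Int) p =>
          if p.1 ≤ st.2.2 then (st.1, st.2.1, max st.2.2 p.2)
          else (st.1 ++ [(st.2.1, st.2.2)], p.1, p.2)) ([], q0, PySem.List.pyGetD bk.2 q0 0)).2] with hfinBd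
      -- bounds for the bucket pairs
      have hpair : ∀ x ∈ filt, 0 ≤ x ∧ x ≤ PySem.List.pyGetD bk.2 x 0 ∧
          PySem.List.pyGetD bk.2 x 0 ≤ (cs.length : Int) := by
        intro x hx
        obtain ⟨k, rfl, hk, htrue⟩ := hfilt_shape x hx
        rw [hhsget k hk, decide_eq_true_eq] at htrue
        obtain ⟨hkn, t, ht, hocc⟩ := htrue
        obtain ⟨v, hv, h0v, hbndv, hcasev⟩ := hmeget k hk
        rw [hv]
        refine ⟨by exact_mod_cast Nat.zero_le k, ?_, ?_⟩
        · have h1 := hbndv t ht ⟨hkn, hocc⟩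
          have hlen0 : (0 : Int) ≤ (((PySem.Chars.lower t.toList).length : Nat) : Int) := by
            exact_mod_cast Nat.zero_le _
          omega
        · rcases hcasev with rfl | ⟨u, hu, hoccu, rfl⟩
          · exact_mod_cast Nat.zero_le _
          · have h2 := pvOcc_le low _ k hoccu.1 hoccu.2
            rw [hlow_len] at h2
            exact_mod_cast h2
      have hq0b := hpair q0 hq0f
      have hfilt_pw' := hfilt_pw
      rw [hfq, List.pairwise_cons] at hfilt_pw'
      have hqs_pw : (qs.map (fun s => (s, PySem.List.pyGetD bk.2 s 0))).Pairwise pvLexLe :=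
        List.Pairwise.map _ (fun a b hab => Or.inl hab) hfilt_pw'.2
      obtain ⟨hfpwB, hfbB, hfSB, hfCB⟩ := pvMergeInv (cs.length : Int)
        (qs.map (fun s => (s, PySem.List.pyGetD bk.2 s 0))) [] q0 (PySem.List.pyGetD bk.2 q0 0) hqs_pw
        (fun p hp => by
          obtain ⟨x, hx, rfl⟩ := List.mem_map.mp hp
          exact hpair x (hqsf x hx))
        (fun p hp => by
          obtain ⟨x, hx, rfl⟩ := List.mem_map.mp hp
          exact le_of_lt (hfilt_pw'.1 x hx))
        List.Pairwise.nil (by simp) (by simp) hq0b.1 hq0b.2.1 hq0b.2.2 _ rfl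
      -- coverage of the bucket-pair list equals coverage of the spans
      have hLS : ∀ i : Int, pvCovSp ((q0 :: qs).map (fun s => (s, PySem.List.pyGetD bk.2 s 0))) i ↔
          pvCovSp spans i := by
        intro i
        constructor
        · rintro ⟨p, hp, h1, h2⟩
          obtain ⟨x, hx, rfl⟩ := List.mem_map.mp hp
          rw [← hfq] at hx
          obtain ⟨k, rfl, hk, htrue⟩ := hfilt_shape x hx
          obtain ⟨v, hv, h0v, hbndv, hcasev⟩ := hmeget k hk
          rw [hv] at h2
          rcases hcasev with rfl | ⟨u, hu, hoccu, rfl⟩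
          · exfalso
            have : (0 : Int) ≤ ((k : Nat) : Int) := by exact_mod_cast Nat.zero_le k
            omega
          · exact ⟨(((k : Nat) : Int), ((k : Nat) : Int) +
              (((PySem.Chars.lower u.toList).length : Nat) : Int)),
              (hspan_mem _).mpr ⟨PySem.Chars.lower u.toList, List.mem_map.mpr ⟨u, hu, rfl⟩,
                k, hoccu.1, hoccu.2, rfl⟩, h1, h2⟩
        · rintro ⟨p, hp, h1, h2⟩
          obtain ⟨tl, htl, j, hjn, hocc, rfl⟩ := (hspan_mem p).mp hp
          obtain ⟨t, ht, rfl⟩ := List.mem_map.mp htl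
          have hj' : j ≤ cs.length := by rw [← hlow_len]; exact hjn
          have hjf : ((j : Nat) : Int) ∈ filt := hfilt_memnat j hj' (by
            rw [hhsget j hj', decide_eq_true_eq]
            exact ⟨hjn, t, ht, hocc⟩)
          obtain ⟨v, hv, h0v, hbndv, hcasev⟩ := hmeget j hj'
          refine ⟨(((j : Nat) : Int), PySem.List.pyGetD bk.2 ((j : Nat) : Int) 0),
            List.mem_map.mpr ⟨((j : Nat) : Int), by rw [← hfq]; exact hjf, rfl⟩, h1, ?_⟩
          rw [hv]
          have h3 := hbndv t ht ⟨hjn, hocc⟩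
          omega
      have hLC : ∀ i : Int, pvCovC ((q0 :: qs).map (fun s => (s, PySem.List.pyGetD bk.2 s 0))) i ↔
          pvCovC spans i := by
        intro i
        constructor
        · rintro ⟨p, hp, h1, h2⟩
          obtain ⟨x, hx, rfl⟩ := List.mem_map.mp hp
          rw [← hfq] at hx
          obtain ⟨k, rfl, hk, htrue⟩ := hfilt_shape x hx
          rw [hhsget k hk, decide_eq_true_eq] at htrue
          obtain ⟨hkn, t0, ht0, hocc0⟩ := htrue
          obtain ⟨v, hv, h0v, hbndv, hcasev⟩ := hmeget k hk
          rw [hv] at h2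
          rcases hcasev with rfl | ⟨u, hu, hoccu, rfl⟩
          · -- v = 0 : only position k = 0 is coverable, and an occurrence exists at 0
            have hk0 : (0 : Int) ≤ ((k : Nat) : Int) := by exact_mod_cast Nat.zero_le k
            have hi0 : i = ((k : Nat) : Int) := by omega
            refine ⟨(((k : Nat) : Int), ((k : Nat) : Int) +
              (((PySem.Chars.lower t0.toList).length : Nat) : Int)),
              (hspan_mem _).mpr ⟨PySem.Chars.lower t0.toList, List.mem_map.mpr ⟨t0, ht0, rfl⟩,
                k, hkn, hocc0, rfl⟩, h1, ?_⟩
            have hl0 : (0 : Int) ≤ (((PySem.Chars.lower t0.toList).length : Nat) : Int) := by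
              exact_mod_cast Nat.zero_le _
            omega
          · exact ⟨(((k : Nat) : Int), ((k : Nat) : Int) +
              (((PySem.Chars.lower u.toList).length : Nat) : Int)),
              (hspan_mem _).mpr ⟨PySem.Chars.lower u.toList, List.mem_map.mpr ⟨u, hu, rfl⟩,
                k, hoccu.1, hoccu.2, rfl⟩, h1, h2⟩
        · rintro ⟨p, hp, h1, h2⟩
          obtain ⟨tl, htl, j, hjn, hocc, rfl⟩ := (hspan_mem p).mp hp
          obtain ⟨t, ht, rfl⟩ := List.mem_map.mp htl
          have hj' : j ≤ cs.length := by rw [← hlow_len]; exact hjn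
          have hjf : ((j : Nat) : Int) ∈ filt := hfilt_memnat j hj' (by
            rw [hhsget j hj', decide_eq_true_eq]
            exact ⟨hjn, t, ht, hocc⟩)
          obtain ⟨v, hv, h0v, hbndv, hcasev⟩ := hmeget j hj'
          refine ⟨(((j : Nat) : Int), PySem.List.pyGetD bk.2 ((j : Nat) : Int) 0),
            List.mem_map.mpr ⟨((j : Nat) : Int), by rw [← hfq]; exact hjf, rfl⟩, h1, ?_⟩
          rw [hv]
          have h3 := hbndv t ht ⟨hjn, hocc⟩
          omega
      -- the two merged lists are the same
      have hfin_eq : finA = finB := by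
        apply pvUnique finA finB hfpwA hfpwB
          (fun p hp => (hfbA p hp).2.1) (fun p hp => (hfbB p hp).2.1)
        · intro i
          rw [hfCA i, hfCB i]
          rw [show (pvCovC [] i ∨ (s0 ≤ i ∧ i ≤ e0) ∨ pvCovC rest i) ↔ pvCovC ((s0, e0) :: rest) i
            from hdecC s0 e0 rest i]
          rw [show (pvCovC [] i ∨ (q0 ≤ i ∧ i ≤ PySem.List.pyGetD bk.2 q0 0) ∨
              pvCovC (qs.map (fun s => (s, PySem.List.pyGetD bk.2 s 0))) i) ↔
              pvCovC ((q0, PySem.List.pyGetD bk.2 q0 0) ::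
                qs.map (fun s => (s, PySem.List.pyGetD bk.2 s 0))) i
            from hdecC _ _ _ i]
          rw [show ((q0, PySem.List.pyGetD bk.2 q0 0) ::
              qs.map (fun s => (s, PySem.List.pyGetD bk.2 s 0))) =
              ((q0 :: qs).map (fun s => (s, PySem.List.pyGetD bk.2 s 0))) from by simp]
          rw [hLC i]
          rw [hmemC ((s0, e0) :: rest) spans (fun p => hss ▸ hmem_ss p) i]
        · intro i
          rw [hfSA i, hfSB i]
          rw [show (pvCovSp [] i ∨ (s0 ≤ i ∧ i < e0) ∨ pvCovSp rest i) ↔ pvCovSp ((s0, e0) :: rest) i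
            from hdecS s0 e0 rest i]
          rw [show (pvCovSp [] i ∨ (q0 ≤ i ∧ i < PySem.List.pyGetD bk.2 q0 0) ∨
              pvCovSp (qs.map (fun s => (s, PySem.List.pyGetD bk.2 s 0))) i) ↔
              pvCovSp ((q0, PySem.List.pyGetD bk.2 q0 0) ::
                qs.map (fun s => (s, PySem.List.pyGetD bk.2 s 0))) i
            from hdecS _ _ _ i]
          rw [show ((q0, PySem.List.pyGetD bk.2 q0 0) ::
              qs.map (fun s => (s, PySem.List.pyGetD bk.2 s 0))) =
              ((q0 :: qs).map (fun s => (s, PySem.List.pyGetD bk.2 s 0))) from by simp]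
          rw [hLS i]
          rw [hmemS ((s0, e0) :: rest) spans (fun p => hss ▸ hmem_ss p) i]
      rw [hfin_eq]
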